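-- pv_equiv track=rewrite | github.com/zvtiyvxx/KalininPavel-Y-232 | Занятие 10/Для 1-го задания/Задание.py | max_cratnoe
-- ===== SOURCE A (Python) =====
-- def max_cratnoe(matrix, k):
--     count = 0
--     max_element = 0
--
--     for row in matrix:
--         for element in row:
--             if element % k == 0:
--                 count += 1
--                 if element > max_element:
--                     max_element = element
--
--     return count, max_element
-- ===== SOURCE B (Python) =====
-- def max_cratnoe(matrix, k):
--     # Map every element to a (count, max-with-0) summary, then reduce the
--     # summaries by a pairwise tournament (halving rounds) instead of one scan.
--     items = [(1, e if e > 0 else 0) if e % k == 0 else (0, 0)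
--              for row in matrix for e in row]
--     while len(items) > 1:
--         nxt = [(items[i][0] + items[i + 1][0],
--                 items[i][1] if items[i][1] > items[i + 1][1] else items[i + 1][1])
--                for i in range(0, len(items) - 1, 2)]
--         if len(items) % 2:
--             nxt.append(items[-1])
--         items = nxt
--     return items[0] if items else (0, 0)
-- ===== Notes on version B (the rewrite author's own statement) =====
-- stated objective: alternative
-- what changed: Replaces A's fused stateful nested-loop scan by a map-reduce over a monoid: each element is mapped to a (count, nonneg-max) summary pair and the summaries are combined by a pairwise tournament reduction in halving rounds, relying on associativity of the merge.
import Mathlib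
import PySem

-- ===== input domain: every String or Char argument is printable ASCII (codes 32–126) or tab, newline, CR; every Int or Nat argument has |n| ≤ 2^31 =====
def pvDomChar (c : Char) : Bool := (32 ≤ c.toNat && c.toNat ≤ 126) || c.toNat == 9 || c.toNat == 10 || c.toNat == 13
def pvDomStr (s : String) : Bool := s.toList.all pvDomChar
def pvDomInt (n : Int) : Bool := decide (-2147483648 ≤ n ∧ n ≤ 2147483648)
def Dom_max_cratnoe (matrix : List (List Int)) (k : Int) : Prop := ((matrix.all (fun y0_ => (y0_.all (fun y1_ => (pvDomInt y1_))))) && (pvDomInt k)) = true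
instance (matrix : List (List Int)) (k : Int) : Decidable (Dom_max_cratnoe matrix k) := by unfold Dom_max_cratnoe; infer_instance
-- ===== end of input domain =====

-- B replaces A's fused stateful scan by a map-reduce: map each element to a (count, max) summary
-- pair and combine the summaries by a pairwise tournament reduction; objective: alternative.

-- ===== PORT A =====
-- fused scan: one pass over the nested lists carrying (count, max_element)
def max_cratnoe (matrix : List (List Int)) (k : Int) : Int × Int :=
  matrix.foldl
    (fun s row =>
      row.foldl
        (fun s e =>
          if PySem.Int.mod e k = 0 then
            (s.1 + 1, if s.2 < e then e else s.2)
          else s)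
        s)
    (0, 0)

-- ===== PORT B =====
-- element → (count, nonneg max) summary, as in Source B's first comprehension
def pvItem (k e : Int) : Int × Int :=
  if PySem.Int.mod e k = 0 then (1, if 0 < e then e else 0) else (0, 0)

-- the pairwise combination Source B's inner comprehension performs on items[i], items[i+1]
def pvMerge (a b : Int × Int) : Int × Int :=
  (a.1 + b.1, if b.2 < a.2 then a.2 else b.2)

-- one tournament round: adjacent pairs merged, odd leftover kept (Source B's nxt)
def pvPairup : List (Int × Int) → List (Int × Int)
  | [] => []
  | [x] => [x]
  | x :: y :: t => pvMerge x y :: pvPairup t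

theorem pvPairup_length_le (l : List (Int × Int)) : (pvPairup l).length ≤ l.length := by
  induction l using pvPairup.induct with
  | case1 => simp [pvPairup]
  | case2 => simp [pvPairup]
  | case3 x y t ih => simp [pvPairup]; omega

-- Source B's while-loop: repeat rounds until at most one summary is left
def pvLoop (l : List (Int × Int)) : List (Int × Int) :=
  if h : 1 < l.length then pvLoop (pvPairup l) else l
termination_by l.length
decreasing_by
  cases l with
  | nil => simp at h
  | cons x t =>
    cases t with
    | nil => simp at h
    | cons y t' =>
      have := pvPairup_length_le t'
      simp [pvPairup]; omega

def max_cratnoe_alt (matrix : List (List Int)) (k : Int) : Int × Int :=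
  let items := matrix.flatMap (fun row => row.map (pvItem k))
  (pvLoop items).headD (0, 0)

-- ===== PRECONDITION & SPEC =====
-- Pre_ excludes exactly k = 0 with at least one element present, where Python's '%' raises
-- ZeroDivisionError (in both A and B); k = 0 with no elements returns normally and is included.
def Pre_max_cratnoe (matrix : List (List Int)) (k : Int) : Prop :=
  k ≠ 0 ∨ matrix.all (fun r => r.isEmpty)
instance (matrix : List (List Int)) (k : Int) : Decidable (Pre_max_cratnoe matrix k) := by unfold Pre_max_cratnoe; infer_instance
def pvWitness_max_cratnoe : List (List Int) × Int := ([[3, 4], [-6, 7]], 3)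

def Spec_max_cratnoe (matrix : List (List Int)) (k : Int) (out : Int × Int) : Prop := out = max_cratnoe_alt matrix k
instance (matrix : List (List Int)) (k : Int) (out : Int × Int) : Decidable (Spec_max_cratnoe matrix k out) := by unfold Spec_max_cratnoe; infer_instance

-- ===== CLAIM =====
def Claim_equal_max_cratnoe : Prop := ∀ (matrix : List (List Int)) (k : Int), Dom_max_cratnoe matrix k → Pre_max_cratnoe matrix k → Spec_max_cratnoe matrix k (max_cratnoe matrix k)

-- ===== LEMMAS AND PROOFS =====

-- the total fold of the summaries (the value the tournament computes)
def pvF (l : List (Int × Int)) : Int × Int := l.foldr pvMerge (0, 0)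

theorem pvMerge_assoc (a b c : Int × Int) :
    pvMerge (pvMerge a b) c = pvMerge a (pvMerge b c) := by
  unfold pvMerge
  refine Prod.ext ?_ ?_ <;> simp <;> [ring; (split_ifs <;> omega)]

theorem pvF_pairup (l : List (Int × Int)) : pvF (pvPairup l) = pvF l := by
  induction l using pvPairup.induct with
  | case1 => rfl
  | case2 => rfl
  | case3 x y t ih => simp [pvPairup, pvF, List.foldr] at *; rw [ih, pvMerge_assoc]

theorem pvPairup_snd_nonneg (l : List (Int × Int)) (h : ∀ p ∈ l, 0 ≤ p.2) :
    ∀ p ∈ pvPairup l, 0 ≤ p.2 := by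
  induction l using pvPairup.induct with
  | case1 => simp [pvPairup]
  | case2 x => simpa [pvPairup] using h
  | case3 x y t ih =>
    intro p hp
    simp [pvPairup] at hp
    rcases hp with hp | hp
    · subst hp
      have hx := h x (by simp); have hy := h y (by simp)
      simp [pvMerge]; split_ifs <;> omega
    · exact ih (fun q hq => h q (by simp [hq])) p hp

theorem pvLoop_headD (l : List (Int × Int)) (h : ∀ p ∈ l, 0 ≤ p.2) :
    (pvLoop l).headD (0, 0) = pvF l := by
  induction l using pvLoop.induct with
  | case1 l hlen ih =>
    rw [pvLoop, dif_pos hlen, ih (pvPairup_snd_nonneg l h), pvF_pairup]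
  | case2 l hlen =>
    rw [pvLoop, dif_neg hlen]
    match l, hlen, h with
    | [], _, _ => rfl
    | [a], _, h =>
      have ha := h a (by simp)
      cases a with
      | mk a1 a2 =>
        simp [pvF, pvMerge]
        omega
    | a :: b :: t, hlen, _ => simp at hlen

-- the running-max foldr with seed 0 is nonnegative
theorem pv_foldr_nonneg (l : List Int) :
    0 ≤ l.foldr (fun e m => if m < e then e else m) 0 := by
  induction l with
  | nil => simp
  | cons a s ih => simp only [List.foldr_cons]; split_ifs <;> omega

-- characterize pvF over mapped items of a flat list, componentwise
theorem pvF_items (k : Int) (l : List Int) :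
    pvF (l.map (pvItem k))
    = (((l.filter (fun e => PySem.Int.mod e k == 0)).length : Int),
       (l.filter (fun e => PySem.Int.mod e k == 0)).foldr (fun e m => if m < e then e else m) 0) := by
  induction l with
  | nil => rfl
  | cons e t ih =>
    by_cases h : PySem.Int.mod e k = 0
    · have hb : (PySem.Int.mod e k == 0) = true := by simp [h]
      simp only [List.map_cons, pvF, List.foldr_cons] at *
      rw [ih]
      simp [List.filter, hb, pvItem, h, pvMerge]
      have h0 := pv_foldr_nonneg (t.filter (fun e => PySem.Int.mod e k == 0))
      constructor
      · push_cast; ring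
      · split_ifs <;> omega
    · have hb : (PySem.Int.mod e k == 0) = false := by simp [h]
      have h0 := pv_foldr_nonneg (t.filter (fun e => PySem.Int.mod e k == 0))
      simp only [List.map_cons, pvF, List.foldr_cons] at *
      rw [ih]
      simp [List.filter, hb, pvItem, h, pvMerge]
      intro h1; omega

-- A's fused inner loop in closed form (count and running max over the row's multiples)
theorem pv_inner (k : Int) (l : List Int) (c m : Int) :
    l.foldl
      (fun s e =>
        if PySem.Int.mod e k = 0 then (s.1 + 1, if s.2 < e then e else s.2) else s)
      (c, m)
    = (c + ((l.filter (fun e => PySem.Int.mod e k == 0)).length : Int),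
       (l.filter (fun e => PySem.Int.mod e k == 0)).foldl (fun m e => if m < e then e else m) m) := by
  induction l generalizing c m with
  | nil => simp
  | cons x t ih =>
    by_cases h : PySem.Int.mod x k = 0
    · have hb : (PySem.Int.mod x k == 0) = true := by simp [h]
      simp [List.filter, h, ih]
      push_cast; ring
    · have hb : (PySem.Int.mod x k == 0) = false := by simp [h]
      simp [List.filter, hb, h, ih]

theorem pv_outer (k : Int) (matrix : List (List Int)) (c m : Int) :
    matrix.foldl
      (fun s row =>
        row.foldl
          (fun s e =>
            if PySem.Int.mod e k = 0 then (s.1 + 1, if s.2 < e then e else s.2) else s)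
          s)
      (c, m)
    = (c + ((matrix.flatMap (fun row => row.filter (fun e => PySem.Int.mod e k == 0))).length : Int),
       (matrix.flatMap (fun row => row.filter (fun e => PySem.Int.mod e k == 0))).foldl (fun m e => if m < e then e else m) m) := by
  induction matrix generalizing c m with
  | nil => simp
  | cons r t ih =>
    simp only [List.foldl_cons, pv_inner, ih, List.flatMap_cons, List.length_append,
      List.foldl_append]
    rw [Prod.mk.injEq]
    exact ⟨by push_cast; ring, rfl⟩

theorem pv_flatMap_map (k : Int) (matrix : List (List Int)) :
    matrix.flatMap (fun row => row.map (pvItem k))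
      = (matrix.flatMap id).map (pvItem k) := by
  induction matrix with
  | nil => rfl
  | cons r t ih => simp only [List.flatMap_cons, List.map_append, id, ih]

theorem pv_flatMap_filter (k : Int) (matrix : List (List Int)) :
    matrix.flatMap (fun row => row.filter (fun e => PySem.Int.mod e k == 0))
      = (matrix.flatMap id).filter (fun e => PySem.Int.mod e k == 0) := by
  induction matrix with
  | nil => rfl
  | cons r t ih => simp only [List.flatMap_cons, List.filter_append, id, ih]

-- pushing the max step through the seed of the foldr
theorem pv_foldr_step (x : Int) (s : List Int) (m : Int) :
    s.foldr (fun e m' => if m' < e then e else m') (if m < x then x else m)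
    = if s.foldr (fun e m' => if m' < e then e else m') m < x then x
      else s.foldr (fun e m' => if m' < e then e else m') m := by
  induction s generalizing m with
  | nil => rfl
  | cons y t ih =>
    simp only [List.foldr_cons, ih]
    split_ifs <;> omega

-- foldl of the max step equals foldr of the max step
theorem pv_foldl_foldr_max (l : List Int) (m : Int) :
    l.foldl (fun m e => if m < e then e else m) m
    = l.foldr (fun e m' => if m' < e then e else m') m := by
  induction l generalizing m with
  | nil => rfl
  | cons x t ih =>
    simp only [List.foldl_cons, List.foldr_cons, ih, pv_foldr_step]

-- ===== VERDICT =====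
theorem max_cratnoe_spec : Claim_equal_max_cratnoe := by
  intro matrix k _ _
  unfold Spec_max_cratnoe max_cratnoe max_cratnoe_alt
  rw [pv_outer]
  have hflat := pv_flatMap_map k matrix
  have hnn : ∀ p ∈ (matrix.flatMap id).map (pvItem k), 0 ≤ p.2 := by
    intro p hp
    simp only [List.mem_map] at hp
    obtain ⟨e, _, he⟩ := hp
    subst he
    unfold pvItem
    split_ifs <;> simp <;> omega
  rw [hflat, pvLoop_headD _ hnn, pvF_items]
  have hfilter := pv_flatMap_filter k matrix
  rw [hfilter, pv_foldl_foldr_max]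
  simp
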